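-- pv_equiv track=rewrite | github.com/Julienpir/Report_creation_Hydro_friendly | src/Data_process.py | msg_reduced
-- ===== SOURCE A (Python) =====
-- def msg_reduced(list_msg): # fct which store only the when the value change in order to avoid rehearsals
--                             # ex : l = (4, 4, 4, 4, 5) -> (4, None, None, None, 5)
--
--     if len(list_msg) < 1:
--         return(list_msg)
--
--     l = [list_msg[0]]
--     past = list_msg[0]
--
--     for k in range(1,len(list_msg)):
--
--         if list_msg[k] != past:
--             past = list_msg[k]
--             msg = list_msg[k]
--
--         else:
--             msg = None
--
--         l.append(msg)
--
--     return(l)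
-- ===== SOURCE B (Python) =====
-- def msg_reduced(list_msg):
--     if len(list_msg) < 1:
--         return list_msg
--
--     out = []
--     n = len(list_msg)
--     i = 0
--     while i < n:
--         v = list_msg[i]
--         j = i + 1
--         while j < n and list_msg[j] == v:
--             j += 1
--         out.append(v)
--         out.extend([None] * (j - i - 1))
--         i = j
--     return out
-- ===== Notes on version B (the rewrite author's own statement) =====
-- stated objective: alternative
-- what changed: Replaces the index loop that threads a 'past' variable and appends element-by-element with a run-based recursion: each maximal run of equal values is measured at once and emitted as its value followed by (run length - 1) None fillers.
import Mathlib
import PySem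

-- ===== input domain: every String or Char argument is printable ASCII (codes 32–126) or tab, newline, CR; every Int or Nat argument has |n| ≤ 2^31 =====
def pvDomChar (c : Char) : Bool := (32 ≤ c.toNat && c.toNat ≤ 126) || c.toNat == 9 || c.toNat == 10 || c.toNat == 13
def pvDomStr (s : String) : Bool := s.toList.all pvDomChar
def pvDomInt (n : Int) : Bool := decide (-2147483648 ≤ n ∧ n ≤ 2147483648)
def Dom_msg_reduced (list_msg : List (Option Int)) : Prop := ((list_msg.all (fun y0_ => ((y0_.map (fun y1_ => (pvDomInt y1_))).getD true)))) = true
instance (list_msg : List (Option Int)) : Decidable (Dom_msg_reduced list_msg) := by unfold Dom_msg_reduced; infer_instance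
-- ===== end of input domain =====

-- B replaces the index loop threading a 'past' variable with a run-based scan
-- (measure each maximal run of equal values, emit its value then None fillers); alternative decomposition, same cost.

-- ===== PORT A =====
def msg_reduced (list_msg : List (Option Int)) : List (Option Int) :=
  if list_msg.length < 1 then list_msg
  else
    let first := PySem.List.pyGetD list_msg 0 none
    ((PySem.List.pyRange 1 (list_msg.length : Int) 1).foldl
      (fun (s : List (Option Int) × Option Int) k =>
        let x := PySem.List.pyGetD list_msg k none
        if x ≠ s.2 then (s.1 ++ [x], x) else (s.1 ++ [none], s.2))
      ([first], first)).1

-- ===== PORT B =====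
-- the inner 'while j < n and list_msg[j] == v: j += 1' scan of Source B
def altScan (xs : List (Option Int)) (v : Option Int) (j : Nat) : Nat :=
  if h : j < xs.length ∧ PySem.List.pyGetD xs (j : Int) none = v then
    altScan xs v (j + 1)
  else j
termination_by xs.length - j
decreasing_by omega

-- termination fact the outer loop's recursion needs: the scan never moves j backwards
theorem altScan_ge (xs : List (Option Int)) (v : Option Int) (j : Nat) : j ≤ altScan xs v j := by
  fun_induction altScan <;> omega

-- the outer 'while i < n' loop of Source B, accumulating 'out'
def altOuter (xs : List (Option Int)) (i : Nat) (out : List (Option Int)) : List (Option Int) :=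
  if h : i < xs.length then
    let v := PySem.List.pyGetD xs (i : Int) none
    let j := altScan xs v (i + 1)
    altOuter xs j (out ++ v :: List.replicate (j - i - 1) none)
  else out
termination_by xs.length - i
decreasing_by have := altScan_ge xs (PySem.List.pyGetD xs (i : Int) none) (i + 1); omega

def msg_reduced_alt (list_msg : List (Option Int)) : List (Option Int) :=
  if list_msg.length < 1 then list_msg
  else altOuter list_msg 0 []

-- ===== PRECONDITION & SPEC =====
def Spec_msg_reduced (list_msg : List (Option Int)) (out : List (Option Int)) : Prop := out = msg_reduced_alt list_msg
instance (list_msg : List (Option Int)) (out : List (Option Int)) : Decidable (Spec_msg_reduced list_msg out) := by unfold Spec_msg_reduced; infer_instance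

-- ===== CLAIM (what is proved, stated in full; the proofs are below) =====
def Claim_equal_msg_reduced : Prop := ∀ (list_msg : List (Option Int)), Dom_msg_reduced list_msg → Spec_msg_reduced list_msg (msg_reduced list_msg)

-- ===== LEMMAS AND PROOFS =====

-- common characterisation both ports are reduced to: runs as a structural recursion
def altCount (v : Option Int) : List (Option Int) → Nat
  | [] => 0
  | x :: xs => if x = v then altCount v xs + 1 else 0

def altRun : List (Option Int) → List (Option Int)
  | [] => []
  | v :: xs =>
    let c := altCount v xs
    v :: (List.replicate c none ++ altRun (xs.drop c))
termination_by xs => xs.length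
decreasing_by
  simp only [List.length_drop, List.length_cons]
  omega

-- A's loop step
def aStep (s : List (Option Int) × Option Int) (x : Option Int) : List (Option Int) × Option Int :=
  if x ≠ s.2 then (s.1 ++ [x], x) else (s.1 ++ [none], s.2)

-- what B produces from the tail of a run whose value is 'past'
def tailOut (past : Option Int) (xs : List (Option Int)) : List (Option Int) :=
  List.replicate (altCount past xs) none ++ altRun (xs.drop (altCount past xs))

theorem altRun_cons (v : Option Int) (xs : List (Option Int)) :
    altRun (v :: xs) = v :: tailOut v xs := by
  rw [altRun, tailOut]

theorem foldl_aStep (xs : List (Option Int)) :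
    ∀ (past : Option Int) (l : List (Option Int)),
      (xs.foldl aStep (l, past)).1 = l ++ tailOut past xs := by
  induction xs with
  | nil => intro past l; simp [tailOut, altCount, altRun]
  | cons x xs ih =>
    intro past l
    by_cases h : x = past
    · subst h
      have hs : aStep (l, x) x = (l ++ [none], x) := by simp [aStep]
      rw [List.foldl_cons, hs, ih]
      simp [tailOut, altCount, List.replicate_succ]
    · have hs : aStep (l, past) x = (l ++ [x], x) := by simp [aStep, h]
      rw [List.foldl_cons, hs, ih]
      simp [tailOut, altCount, h, altRun]

theorem altScan_eq (xs : List (Option Int)) (v : Option Int) (j : Nat) :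
    altScan xs v j = j + altCount v (xs.drop j) := by
  fun_induction altScan with
  | case1 j h ih =>
    obtain ⟨hj, hv⟩ := h
    rw [ih, List.drop_eq_getElem_cons hj]
    have hg : PySem.List.pyGetD xs (j : Int) none = xs[j] := by
      simp [pysem, PySem.List.pyGetD_eq_getElem, hj]
    rw [hg] at hv
    simp [altCount, hv]
    ring
  | case2 j h =>
    by_cases hj : j < xs.length
    · have hv : ¬ PySem.List.pyGetD xs (j : Int) none = v := fun hv => h ⟨hj, hv⟩
      have hg : PySem.List.pyGetD xs (j : Int) none = xs[j] := by
        simp [pysem, PySem.List.pyGetD_eq_getElem, hj]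
      rw [List.drop_eq_getElem_cons hj]
      rw [hg] at hv
      simp [altCount, hv]
    · rw [List.drop_eq_nil_of_le (by omega)]
      simp [altCount]

theorem altOuter_eq (xs : List (Option Int)) :
    ∀ (i : Nat) (out : List (Option Int)), altOuter xs i out = out ++ altRun (xs.drop i) := by
  intro i out
  fun_induction altOuter with
  | case1 i out h v j ih =>
    have hg : v = xs[i] := by
      simp [v, pysem, PySem.List.pyGetD_eq_getElem, h]
    have hj : j = i + 1 + altCount v (xs.drop (i + 1)) := by
      simpa using altScan_eq xs v (i + 1)
    rw [ih]
    rw [List.drop_eq_getElem_cons h, ← hg, altRun]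
    have hdrop : xs.drop j = (xs.drop (i + 1)).drop (altCount v (xs.drop (i + 1))) := by
      rw [List.drop_drop, hj]
    rw [hdrop, hj]
    simp
    omega
  | case2 i out h =>
    rw [List.drop_eq_nil_of_le (by omega)]
    simp [altRun]

-- ===== VERDICT (by name: the statement is the Claim_ definition above) =====
theorem msg_reduced_spec : Claim_equal_msg_reduced := by
  intro list_msg _
  unfold Spec_msg_reduced msg_reduced msg_reduced_alt
  cases list_msg with
  | nil => simp
  | cons v xs =>
    rw [if_neg (by simp), if_neg (by simp)]
    dsimp only
    have hfold := PySem.List.foldl_pyRange_pyGetD' (v :: xs) (none : Option Int) aStep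
      ([PySem.List.pyGetD (v :: xs) 0 none], PySem.List.pyGetD (v :: xs) 0 none) (a := 1) (by omega)
    simp only [aStep] at hfold
    rw [hfold]
    have h0 : PySem.List.pyGetD (v :: xs) 0 none = v := by simp [pysem]
    rw [h0]
    have hd : (v :: xs).drop (1 : Int).toNat = xs := by simp
    rw [hd, foldl_aStep xs v [v], altOuter_eq]
    simp [altRun_cons]
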